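-- pv_equiv track=rewrite | github.com/Ostorlab/agent_osv | agent/osv_output_handler.py | calculate_risk_rating
-- ===== SOURCE A (Python) =====
-- RISK_PRIORITY_LEVELS = {
--     "CRITICAL": 1,
--     "HIGH": 2,
--     "MEDIUM": 3,
--     "LOW": 4,
--     "POTENTIALLY": 5,
-- }
--
-- def calculate_risk_rating(risk_ratings: list[str]) -> str:
--     """Calculate the risk rating of a given cve ids of a vulnerability
--     Args:
--         risk_ratings: list of risk ratings
--     Returns:
--         Risk rating of a vulnerability
--     """
--     risk_ratings = [risk_rating.upper() for risk_rating in risk_ratings]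
--     sorted_ratings = sorted(
--         risk_ratings, key=lambda x: RISK_PRIORITY_LEVELS.get(x, 5), reverse=False
--     )
--
--     for rating in sorted_ratings:
--         if rating in RISK_PRIORITY_LEVELS:
--             return rating
--     return "POTENTIALLY"
-- ===== SOURCE B (Python) =====
-- RISK_PRIORITY_LEVELS = {
--     "CRITICAL": 1,
--     "HIGH": 2,
--     "MEDIUM": 3,
--     "LOW": 4,
--     "POTENTIALLY": 5,
-- }
--
--
-- def calculate_risk_rating(risk_ratings: list[str]) -> str:
--     """Calculate the risk rating of a given cve ids of a vulnerability."""
--     present = {risk_rating.upper() for risk_rating in risk_ratings}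
--     for level in RISK_PRIORITY_LEVELS:
--         if level in present:
--             return level
--     return "POTENTIALLY"
-- ===== Notes on version B (the rewrite author's own statement) =====
-- stated objective: idiomatic
-- what changed: Instead of sorting the input by priority and scanning it for the first known rating, B builds a set of the uppercased ratings once and walks the fixed priority table in ascending-priority order, returning the first level present.
import Mathlib
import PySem

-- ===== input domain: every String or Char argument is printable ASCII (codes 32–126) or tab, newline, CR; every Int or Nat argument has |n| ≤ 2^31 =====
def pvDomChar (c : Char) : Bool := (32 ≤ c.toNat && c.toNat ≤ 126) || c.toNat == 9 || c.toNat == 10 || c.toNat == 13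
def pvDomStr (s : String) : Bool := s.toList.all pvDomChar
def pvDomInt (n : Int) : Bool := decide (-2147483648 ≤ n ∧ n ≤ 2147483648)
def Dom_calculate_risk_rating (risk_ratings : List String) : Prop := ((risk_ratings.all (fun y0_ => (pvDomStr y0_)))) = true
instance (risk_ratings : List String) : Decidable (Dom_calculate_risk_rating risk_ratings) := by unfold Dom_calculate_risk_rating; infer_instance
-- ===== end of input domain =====

-- B re-implements the lookup: instead of sorting the data by priority and scanning it,
-- it walks the fixed priority table in ascending order testing membership in a set of
-- the uppercased ratings (idiomatic; return value identical).

-- ===== PORT A =====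
-- RISK_PRIORITY_LEVELS (module constant, shared by both sources)
def RISK_PRIORITY_LEVELS : PySem.Dict String Int :=
  ((((PySem.Dict.empty.insert "CRITICAL" 1).insert "HIGH" 2).insert "MEDIUM" 3).insert
      "LOW" 4).insert "POTENTIALLY" 5

def calculate_risk_rating (risk_ratings : List String) : String :=
  let risk_ratings' := risk_ratings.map PySem.Str.upper
  let sorted_ratings :=
    PySem.List.sorted risk_ratings' (fun x => RISK_PRIORITY_LEVELS.getD x 5) false
  -- 'for rating in sorted_ratings: if rating in RISK_PRIORITY_LEVELS: return rating'
  match sorted_ratings.find? (fun rating => RISK_PRIORITY_LEVELS.contains rating) with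
  | some rating => rating
  | none => "POTENTIALLY"

-- ===== PORT B =====
def calculate_risk_rating_alt (risk_ratings : List String) : String :=
  let present := PySem.Set.ofList (risk_ratings.map PySem.Str.upper)
  -- 'for level in RISK_PRIORITY_LEVELS: if level in present: return level'
  match RISK_PRIORITY_LEVELS.keys.find? (fun level => PySem.Set.contains present level) with
  | some level => level
  | none => "POTENTIALLY"

-- ===== PRECONDITION & SPEC =====
def Spec_calculate_risk_rating (risk_ratings : List String) (out : String) : Prop := out = calculate_risk_rating_alt risk_ratings
instance (risk_ratings : List String) (out : String) : Decidable (Spec_calculate_risk_rating risk_ratings out) := by unfold Spec_calculate_risk_rating; infer_instance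

-- ===== CLAIM (what is proved, stated in full; the proofs are below) =====
def Claim_equal_calculate_risk_rating : Prop := ∀ (risk_ratings : List String), Dom_calculate_risk_rating risk_ratings → Spec_calculate_risk_rating risk_ratings (calculate_risk_rating risk_ratings)

-- ===== LEMMAS AND PROOFS =====

theorem pvKeys_eval :
    RISK_PRIORITY_LEVELS.keys = ["CRITICAL", "HIGH", "MEDIUM", "LOW", "POTENTIALLY"] := by
  decide

-- a rating passing A's membership test is one of the five table keys
theorem pvKnown_cases {r : String} (h : RISK_PRIORITY_LEVELS.contains r = true) :
    r = "CRITICAL" ∨ r = "HIGH" ∨ r = "MEDIUM" ∨ r = "LOW" ∨ r = "POTENTIALLY" := by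
  rw [PySem.Dict.contains_eq_decide_mem_keys, pvKeys_eval] at h
  simpa using of_decide_eq_true h

-- the priority table's values are distinct, so they identify the key
theorem pvKey_inj {x lvl : String} (hx : RISK_PRIORITY_LEVELS.contains x = true)
    (hlvl : RISK_PRIORITY_LEVELS.contains lvl = true)
    (hk : RISK_PRIORITY_LEVELS.getD x 5 = RISK_PRIORITY_LEVELS.getD lvl 5) : x = lvl := by
  rcases pvKnown_cases hx with h | h | h | h | h <;>
    rcases pvKnown_cases hlvl with h2 | h2 | h2 | h2 | h2 <;> subst h <;> subst h2 <;>
      first | rfl | (exfalso; revert hk; decide)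

-- find? on a key-sorted list returns an element of minimal key among those accepted
theorem pvFind?_min {α : Type} (k : α → Int) (p : α → Bool) :
    ∀ {l : List α} {r : α}, l.Pairwise (fun a b => k a ≤ k b) → l.find? p = some r →
      ∀ x ∈ l, p x = true → k r ≤ k x := by
  intro l
  induction l with
  | nil => intro r _ hf; simp [List.find?] at hf
  | cons a t ih =>
    intro r hp hf x hx hpx
    rw [List.pairwise_cons] at hp
    by_cases ha : p a = true
    · rw [List.find?_cons_of_pos ha] at hf
      cases hf
      rcases List.mem_cons.mp hx with hx | hx
      · simp [hx]
      · exact hp.1 x hx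
    · rw [List.find?_cons_of_neg ha] at hf
      rcases List.mem_cons.mp hx with hx | hx
      · rw [hx] at hpx; exact absurd hpx ha
      · exact ih hp.2 hf x hx hpx

-- A's scan over the sorted list returns exactly the present level of least priority value
theorem pvFind_sorted_eq (u : List String) (lvl : String)
    (hlvl : RISK_PRIORITY_LEVELS.contains lvl = true) (hmem : lvl ∈ u)
    (hprev : ∀ x : String, RISK_PRIORITY_LEVELS.contains x = true → x ∈ u →
      RISK_PRIORITY_LEVELS.getD x 5 < RISK_PRIORITY_LEVELS.getD lvl 5 → False)
    (hkey : ∀ x : String, RISK_PRIORITY_LEVELS.contains x = true →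
      RISK_PRIORITY_LEVELS.getD x 5 = RISK_PRIORITY_LEVELS.getD lvl 5 → x = lvl) :
    List.find? (fun rating => RISK_PRIORITY_LEVELS.contains rating)
      (PySem.List.sorted u (fun x => RISK_PRIORITY_LEVELS.getD x 5) false) = some lvl := by
  set s := PySem.List.sorted u (fun x => RISK_PRIORITY_LEVELS.getD x 5) false with hs
  have hlvls : lvl ∈ s := by
    rw [hs, PySem.List.mem_sorted]; exact hmem
  have hsome : (s.find? (fun rating => RISK_PRIORITY_LEVELS.contains rating)).isSome := by
    rw [List.find?_isSome]; exact ⟨lvl, hlvls, hlvl⟩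
  obtain ⟨r, hr⟩ := Option.isSome_iff_exists.mp hsome
  have hpr : RISK_PRIORITY_LEVELS.contains r = true := List.find?_some hr
  have hru : r ∈ u := by
    have := List.mem_of_find?_eq_some hr
    rwa [hs, PySem.List.mem_sorted] at this
  have hpair : s.Pairwise (fun a b =>
      RISK_PRIORITY_LEVELS.getD a 5 ≤ RISK_PRIORITY_LEVELS.getD b 5) := by
    rw [hs]; exact PySem.List.sorted_pairwise u _
  have hmin : RISK_PRIORITY_LEVELS.getD r 5 ≤ RISK_PRIORITY_LEVELS.getD lvl 5 :=
    pvFind?_min (fun x => RISK_PRIORITY_LEVELS.getD x 5) _ hpair hr _ hlvls hlvl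
  rcases lt_or_eq_of_le hmin with hlt | heq
  · exact absurd (hprev r hpr hru hlt) (fun h => h)
  · rw [hr, hkey r hpr heq]

theorem calculate_risk_rating_eq_alt (risk_ratings : List String) :
    calculate_risk_rating risk_ratings = calculate_risk_rating_alt risk_ratings := by
  unfold calculate_risk_rating calculate_risk_rating_alt
  set u := risk_ratings.map PySem.Str.upper with hu
  have hcontains : ∀ x : String,
      PySem.Set.contains (PySem.Set.ofList u) x = decide (x ∈ u) := by
    intro x
    by_cases h : x ∈ u
    · rw [decide_eq_true h]
      exact (PySem.Set.contains_iff _ x).mpr ((PySem.Set.mem_ofList u x).mpr h)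
    · rw [decide_eq_false h]
      exact Bool.eq_false_iff.mpr
        (fun hc => h ((PySem.Set.mem_ofList u x).mp ((PySem.Set.contains_iff _ x).mp hc)))
  rw [pvKeys_eval]
  simp only [List.find?, hcontains]
  by_cases hC : "CRITICAL" ∈ u
  · have hfind : List.find? (fun rating => RISK_PRIORITY_LEVELS.contains rating)
        (PySem.List.sorted u (fun x => RISK_PRIORITY_LEVELS.getD x 5) false) = some "CRITICAL" := by
      refine pvFind_sorted_eq u "CRITICAL" (by decide) hC ?_ (fun x hx hk => pvKey_inj hx (by decide) hk)
      intro x hx hxu hk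
      rcases pvKnown_cases hx with h | h | h | h | h <;> subst h <;> revert hk <;> decide
    rw [hfind]
    have d0 : decide ("CRITICAL" ∈ u) = true := decide_eq_true hC
    rw [d0]
  by_cases hH : "HIGH" ∈ u
  · have hfind : List.find? (fun rating => RISK_PRIORITY_LEVELS.contains rating)
        (PySem.List.sorted u (fun x => RISK_PRIORITY_LEVELS.getD x 5) false) = some "HIGH" := by
      refine pvFind_sorted_eq u "HIGH" (by decide) hH ?_ (fun x hx hk => pvKey_inj hx (by decide) hk)
      intro x hx hxu hk
      rcases pvKnown_cases hx with h | h | h | h | h <;> subst h <;>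
        first | (revert hk; decide) | exact absurd hxu (by assumption)
    rw [hfind]
    have d0 : decide ("CRITICAL" ∈ u) = false := decide_eq_false hC
    have d1 : decide ("HIGH" ∈ u) = true := decide_eq_true hH
    rw [d0, d1]
  by_cases hM : "MEDIUM" ∈ u
  · have hfind : List.find? (fun rating => RISK_PRIORITY_LEVELS.contains rating)
        (PySem.List.sorted u (fun x => RISK_PRIORITY_LEVELS.getD x 5) false) = some "MEDIUM" := by
      refine pvFind_sorted_eq u "MEDIUM" (by decide) hM ?_ (fun x hx hk => pvKey_inj hx (by decide) hk)
      intro x hx hxu hk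
      rcases pvKnown_cases hx with h | h | h | h | h <;> subst h <;>
        first | (revert hk; decide) | exact absurd hxu (by assumption)
    rw [hfind]
    have d0 : decide ("CRITICAL" ∈ u) = false := decide_eq_false hC
    have d1 : decide ("HIGH" ∈ u) = false := decide_eq_false hH
    have d2 : decide ("MEDIUM" ∈ u) = true := decide_eq_true hM
    rw [d0, d1, d2]
  by_cases hL : "LOW" ∈ u
  · have hfind : List.find? (fun rating => RISK_PRIORITY_LEVELS.contains rating)
        (PySem.List.sorted u (fun x => RISK_PRIORITY_LEVELS.getD x 5) false) = some "LOW" := by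
      refine pvFind_sorted_eq u "LOW" (by decide) hL ?_ (fun x hx hk => pvKey_inj hx (by decide) hk)
      intro x hx hxu hk
      rcases pvKnown_cases hx with h | h | h | h | h <;> subst h <;>
        first | (revert hk; decide) | exact absurd hxu (by assumption)
    rw [hfind]
    have d0 : decide ("CRITICAL" ∈ u) = false := decide_eq_false hC
    have d1 : decide ("HIGH" ∈ u) = false := decide_eq_false hH
    have d2 : decide ("MEDIUM" ∈ u) = false := decide_eq_false hM
    have d3 : decide ("LOW" ∈ u) = true := decide_eq_true hL
    rw [d0, d1, d2, d3]
  by_cases hP : "POTENTIALLY" ∈ u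
  · have hfind : List.find? (fun rating => RISK_PRIORITY_LEVELS.contains rating)
        (PySem.List.sorted u (fun x => RISK_PRIORITY_LEVELS.getD x 5) false) = some "POTENTIALLY" := by
      refine pvFind_sorted_eq u "POTENTIALLY" (by decide) hP ?_ (fun x hx hk => pvKey_inj hx (by decide) hk)
      intro x hx hxu hk
      rcases pvKnown_cases hx with h | h | h | h | h <;> subst h <;>
        first | (revert hk; decide) | exact absurd hxu (by assumption)
    rw [hfind]
    have d0 : decide ("CRITICAL" ∈ u) = false := decide_eq_false hC
    have d1 : decide ("HIGH" ∈ u) = false := decide_eq_false hH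
    have d2 : decide ("MEDIUM" ∈ u) = false := decide_eq_false hM
    have d3 : decide ("LOW" ∈ u) = false := decide_eq_false hL
    have d4 : decide ("POTENTIALLY" ∈ u) = true := decide_eq_true hP
    rw [d0, d1, d2, d3, d4]
  have hnone : List.find? (fun rating => RISK_PRIORITY_LEVELS.contains rating)
      (PySem.List.sorted u (fun x => RISK_PRIORITY_LEVELS.getD x 5) false) = none := by
    rw [List.find?_eq_none]
    intro x hx hpx
    have hxu : x ∈ u := (PySem.List.mem_sorted u _ false x).mp hx
    rcases pvKnown_cases hpx with h | h | h | h | h <;> subst h <;> exact absurd hxu (by assumption)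
  rw [hnone]
  have d0 : decide ("CRITICAL" ∈ u) = false := decide_eq_false hC
  have d1 : decide ("HIGH" ∈ u) = false := decide_eq_false hH
  have d2 : decide ("MEDIUM" ∈ u) = false := decide_eq_false hM
  have d3 : decide ("LOW" ∈ u) = false := decide_eq_false hL
  have d4 : decide ("POTENTIALLY" ∈ u) = false := decide_eq_false hP
  rw [d0, d1, d2, d3, d4]


-- ===== VERDICT (by name: the statement is the Claim_ definition above) =====
theorem calculate_risk_rating_spec : Claim_equal_calculate_risk_rating := by
  intro risk_ratings _
  exact calculate_risk_rating_eq_alt risk_ratings
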